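-- pv_equiv track=rewrite | github.com/JPhamNguyen/ENM-Protein-Predictor | data_utils.py | remove_extra_entries
-- ===== SOURCE A (Python) =====
-- def remove_extra_entries(mask):
--     """Remove extra entries like '' or '\n' in the binary mask iff the length of mask does not match the corresponding
--     dataframe length
--     Args:
--         :param: mask (array): the binary mask as a list of values
--     Returns: mask (array): the binary mask with extraneous values removed from end of list
--     """
--     for i, col in reversed(list(enumerate(mask))):
--         stripped_col = col.strip()
--         if stripped_col == "True" or stripped_col == "False":
--             break
--         else:
--             del mask[i]
--     return mask
-- ===== SOURCE B (Python) =====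
-- def remove_extra_entries(mask):
--     for i in reversed(range(len(mask))):
--         s = mask[i].strip()
--         if s == "True" or s == "False":
--             del mask[i + 1:]
--             return mask
--     del mask[:]
--     return mask
-- ===== Notes on version B (the rewrite author's own statement) =====
-- stated objective: simpler
-- what changed: Instead of deleting trailing non-boolean entries one by one while walking a reversed enumerate, B locates the index of the last entry stripping to 'True'/'False' and truncates everything after it with a single slice deletion (or clears the list if none is found), still mutating in place.
import Mathlib
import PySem

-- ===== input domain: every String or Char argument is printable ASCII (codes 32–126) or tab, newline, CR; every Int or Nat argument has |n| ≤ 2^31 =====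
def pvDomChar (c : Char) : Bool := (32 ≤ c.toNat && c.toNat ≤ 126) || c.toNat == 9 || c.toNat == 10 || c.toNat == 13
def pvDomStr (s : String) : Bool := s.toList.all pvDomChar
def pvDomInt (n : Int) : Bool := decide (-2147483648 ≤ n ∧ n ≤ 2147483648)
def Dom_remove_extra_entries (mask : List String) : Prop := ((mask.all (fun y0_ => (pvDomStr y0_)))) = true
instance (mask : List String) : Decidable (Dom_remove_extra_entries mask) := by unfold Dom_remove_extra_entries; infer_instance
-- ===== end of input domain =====

-- B replaces A's one-by-one deletion of trailing non-boolean entries by a single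
-- boundary search plus one slice truncation (simpler); both Pythons mutate `mask`
-- in place the same way, the equivalence proved here is about the returned value.

-- shared predicate: col.strip() == "True" or col.strip() == "False"
def pvIsMaskBool (s : String) : Bool :=
  (PySem.Str.strip s == "True") || (PySem.Str.strip s == "False")

-- ===== PORT A =====
-- A walks reversed(list(enumerate(mask))): break at the first boolean entry
-- (keeping it and everything before it), otherwise delete the entry (always the
-- current last one).  On the reversed list that is exactly this recursion.
def pvALoop : List String → List String
  | [] => []
  | c :: rest => if pvIsMaskBool c then c :: rest else pvALoop rest

def remove_extra_entries (mask : List String) : List String :=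
  (pvALoop mask.reverse).reverse

-- ===== PORT B =====
-- Source B: for i in reversed(range(len(mask))): if ok(mask[i]): del mask[i+1:]; return
--       then del mask[:]
def pvBFind (mask : List String) : List Nat → Option Nat
  | [] => none
  | i :: is => if pvIsMaskBool (mask.getD i "") then some i else pvBFind mask is

def remove_extra_entries_alt (mask : List String) : List String :=
  match pvBFind mask (List.range mask.length).reverse with
  | some i => mask.take (i + 1)
  | none => []

-- ===== PRECONDITION & SPEC =====
def Spec_remove_extra_entries (mask : List String) (out : List String) : Prop := out = remove_extra_entries_alt mask
instance (mask : List String) (out : List String) : Decidable (Spec_remove_extra_entries mask out) := by unfold Spec_remove_extra_entries; infer_instance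

-- ===== CLAIM (what is proved, stated in full; the proofs are below) =====
def Claim_equal_remove_extra_entries : Prop := ∀ (mask : List String), Dom_remove_extra_entries mask → Spec_remove_extra_entries mask (remove_extra_entries mask)

-- ===== LEMMAS AND PROOFS =====

theorem pvBFind_mem (mask : List String) (l : List Nat) (i : Nat)
    (h : pvBFind mask l = some i) : i ∈ l := by
  induction l with
  | nil => simp [pvBFind] at h
  | cons j js ih =>
    rw [pvBFind] at h
    split at h
    · cases h; exact List.mem_cons_self
    · exact List.mem_cons_of_mem _ (ih h)

theorem pvGetD_append_lt (xs : List String) (x : String) (i : Nat)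
    (h : i < xs.length) : (xs ++ [x]).getD i "" = xs.getD i "" := by
  simp [List.getD_eq_getElem?_getD, List.getElem?_append_left h]

theorem pvBFind_append (xs : List String) (x : String) (l : List Nat)
    (hl : ∀ i ∈ l, i < xs.length) : pvBFind (xs ++ [x]) l = pvBFind xs l := by
  induction l with
  | nil => rfl
  | cons j js ih =>
    have hj : j < xs.length := hl j (List.mem_cons_self)
    have h' : ∀ i ∈ js, i < xs.length := fun i hi => hl i (List.mem_cons_of_mem _ hi)
    rw [pvBFind, pvBFind, pvGetD_append_lt xs x j hj, ih h']

theorem pv_eq (mask : List String) :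
    remove_extra_entries mask = remove_extra_entries_alt mask := by
  induction mask using List.reverseRecOn with
  | nil => rfl
  | append_singleton xs x ih =>
    have hrange : (List.range (xs.length + 1)).reverse
        = xs.length :: (List.range xs.length).reverse := by
      simp [List.range_succ]
    have hlast : (xs ++ [x]).getD xs.length "" = x := by
      simp [List.getD_eq_getElem?_getD]
    by_cases hx : pvIsMaskBool x
    · -- A breaks immediately; B finds the last index
      have hA : remove_extra_entries (xs ++ [x]) = xs ++ [x] := by
        simp [remove_extra_entries, pvALoop, hx]
      have hB : remove_extra_entries_alt (xs ++ [x]) = xs ++ [x] := by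
        unfold remove_extra_entries_alt
        simp only [List.length_append, List.length_singleton, hrange, pvBFind, hlast, hx,
          if_pos]
        exact List.take_of_length_le (by simp)
      rw [hA, hB]
    · -- both drop the last element and continue
      have hA : remove_extra_entries (xs ++ [x]) = remove_extra_entries xs := by
        simp [remove_extra_entries, pvALoop, hx]
      have hfind : pvBFind (xs ++ [x]) ((List.range xs.length).reverse)
          = pvBFind xs ((List.range xs.length).reverse) := by
        apply pvBFind_append
        intro i hi
        simpa using (List.mem_range).1 (List.mem_reverse.1 hi)
      have hB : remove_extra_entries_alt (xs ++ [x]) = remove_extra_entries_alt xs := by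
        unfold remove_extra_entries_alt
        simp only [List.length_append, List.length_singleton, hrange, pvBFind, hlast, hx,
          if_neg, Bool.false_eq_true, not_false_iff, hfind]
        cases hfb : pvBFind xs ((List.range xs.length).reverse) with
        | none => rfl
        | some i =>
          have hi : i < xs.length := by
            simpa using (List.mem_range).1 (List.mem_reverse.1 (pvBFind_mem _ _ _ hfb))
          simp [List.take_append_of_le_length (by omega : i + 1 ≤ xs.length)]
      rw [hA, hB, ih]

-- ===== VERDICT (by name: the statement is the Claim_ definition above) =====
theorem remove_extra_entries_spec : Claim_equal_remove_extra_entries := by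
  intro mask _
  exact pv_eq mask
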